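-- pv_equiv track=rewrite | github.com/SirPoko/Lexer-Poko | lexerPoko.py | mprocedure
-- ===== SOURCE A (Python) =====
-- ESTADO_FINAL = "ESTADO FINAL"
--
-- ESTADO_NO_FINAL = "NO ACEPTADO"
--
-- ESTADO_TRAMPA = "EN ESTADO TRAMPA"
--
-- def mprocedure(cadena):
--     estado = 0
--     estados_aceptados = [9]
--     delta = {0:{'p':1}, 1:{'r':2}, 2:{'o':3}, 3:{'c':4}, 4:{'e':5}, 5:{'d':6}, 6:{'u':7}, 7:{'r':8}, 8:{'e':9}, 9:{}}
--     for caracter in cadena: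
--         if caracter in delta[estado].keys():
--             estado = delta[estado][caracter]
--         else:
--             estado = -1
--             break
--     if estado == -1:
--         return ESTADO_TRAMPA
--     if estado in estados_aceptados:
--         return ESTADO_FINAL
--     else:
--         return ESTADO_NO_FINAL
-- ===== SOURCE B (Python) =====
-- ESTADO_FINAL = "ESTADO FINAL"
--
-- ESTADO_NO_FINAL = "NO ACEPTADO"
--
-- ESTADO_TRAMPA = "EN ESTADO TRAMPA"
--
-- def mprocedure(cadena):
--     if cadena == "procedure":
--         return ESTADO_FINAL
--     if "procedure".startswith(cadena):
--         return ESTADO_NO_FINAL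
--     return ESTADO_TRAMPA
-- ===== Notes on version B (the rewrite author's own statement) =====
-- stated objective: simpler
-- what changed: The hand-written 10-state DFA walk over a transition table is replaced by two direct tests of the input against the target keyword (exact match, proper prefix, or neither); no loop or transition table remains.
import Mathlib
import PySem

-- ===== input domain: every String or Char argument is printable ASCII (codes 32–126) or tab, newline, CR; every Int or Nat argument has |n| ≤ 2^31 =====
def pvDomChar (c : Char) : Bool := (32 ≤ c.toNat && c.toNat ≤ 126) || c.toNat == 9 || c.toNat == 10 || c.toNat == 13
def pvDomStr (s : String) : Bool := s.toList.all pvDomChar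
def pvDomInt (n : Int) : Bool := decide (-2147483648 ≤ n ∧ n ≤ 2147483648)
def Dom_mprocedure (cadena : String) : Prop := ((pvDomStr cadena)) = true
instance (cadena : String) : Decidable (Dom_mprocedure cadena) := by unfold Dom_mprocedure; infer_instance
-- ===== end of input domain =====

-- B replaces the DFA walk over a transition table by two direct tests against the literal "procedure" (simpler; return value only).

-- ===== PORT A =====
def pvEstadoFinal : String := "ESTADO FINAL"
def pvEstadoNoFinal : String := "NO ACEPTADO"
def pvEstadoTrampa : String := "EN ESTADO TRAMPA"

-- delta = {0:{'p':1}, 1:{'r':2}, ..., 9:{}}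
def pvDelta : PySem.Dict Int (PySem.Dict Char Int) :=
  PySem.Dict.mk [(0, PySem.Dict.mk [('p', 1)]), (1, PySem.Dict.mk [('r', 2)]),
    (2, PySem.Dict.mk [('o', 3)]), (3, PySem.Dict.mk [('c', 4)]),
    (4, PySem.Dict.mk [('e', 5)]), (5, PySem.Dict.mk [('d', 6)]),
    (6, PySem.Dict.mk [('u', 7)]), (7, PySem.Dict.mk [('r', 8)]),
    (8, PySem.Dict.mk [('e', 9)]), (9, PySem.Dict.mk [])]

-- the 'for caracter in cadena' loop with its break (estado := -1, stop)
def pvLoopA (estado : Int) : List Char → Int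
  | [] => estado
  | caracter :: rest =>
    match (pvDelta.get? estado).bind (fun d => d.get? caracter) with
    | some s => pvLoopA s rest
    | none => -1

def mprocedure (cadena : String) : String :=
  let estado := pvLoopA 0 cadena.toList
  let estados_aceptados : List Int := [9]
  if estado = -1 then pvEstadoTrampa
  else if estado ∈ estados_aceptados then pvEstadoFinal
  else pvEstadoNoFinal

-- ===== PORT B =====
def mprocedure_alt (cadena : String) : String :=
  if cadena = "procedure" then pvEstadoFinal
  else if PySem.Str.startswith "procedure" cadena then pvEstadoNoFinal
  else pvEstadoTrampa

-- ===== PRECONDITION & SPEC =====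
def Spec_mprocedure (cadena : String) (out : String) : Prop := out = mprocedure_alt cadena
instance (cadena : String) (out : String) : Decidable (Spec_mprocedure cadena out) := by unfold Spec_mprocedure; infer_instance

-- ===== CLAIM (what is proved, stated in full; the proofs are below) =====
def Claim_equal_mprocedure : Prop := ∀ (cadena : String), Dom_mprocedure cadena → Spec_mprocedure cadena (mprocedure cadena)

-- ===== LEMMAS AND PROOFS =====

-- The DFA state after reading l from state k (0 ≤ k ≤ 9) is k + |l| if l is a
-- prefix of the remaining suffix of "procedure", and the trap state -1 otherwise.
-- state 9: any further character traps
theorem pvLoop_9 (l : List Char) :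
    pvLoopA 9 l = if l.isPrefixOf ([] : List Char) then 9 + (l.length : Int) else -1 := by
  cases l with
  | nil => simp [pvLoopA]
  | cons c r => simp [pvLoopA, pvDelta, PySem.Dict.get?]

theorem pvLoop_8 (l : List Char) :
    pvLoopA 8 l = if l.isPrefixOf (['e'] : List Char) then 8 + (l.length : Int) else -1 := by
  cases l with
  | nil => simp [pvLoopA]
  | cons c r =>
    rw [pvLoopA]
    by_cases hc : c = 'e'
    · subst hc
      simp [pvDelta, PySem.Dict.get?_mk_cons, PySem.Dict.get?, pvLoop_9]
      first
      | (split_ifs <;> omega)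
      | omega
    · simp only [pvDelta, PySem.Dict.get?_mk_cons, PySem.Dict.get?, hc]
      norm_num
      rw [if_neg (fun h => hc h.symm)]
      simp [hc]

theorem pvLoop_7 (l : List Char) :
    pvLoopA 7 l = if l.isPrefixOf (['r', 'e'] : List Char) then 7 + (l.length : Int) else -1 := by
  cases l with
  | nil => simp [pvLoopA]
  | cons c r =>
    rw [pvLoopA]
    by_cases hc : c = 'r'
    · subst hc
      simp [pvDelta, PySem.Dict.get?_mk_cons, PySem.Dict.get?, pvLoop_8]
      first
      | (split_ifs <;> omega)
      | omega
    · simp only [pvDelta, PySem.Dict.get?_mk_cons, PySem.Dict.get?, hc]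
      norm_num
      rw [if_neg (fun h => hc h.symm)]
      simp [hc]

theorem pvLoop_6 (l : List Char) :
    pvLoopA 6 l = if l.isPrefixOf (['u', 'r', 'e'] : List Char) then 6 + (l.length : Int) else -1 := by
  cases l with
  | nil => simp [pvLoopA]
  | cons c r =>
    rw [pvLoopA]
    by_cases hc : c = 'u'
    · subst hc
      simp [pvDelta, PySem.Dict.get?_mk_cons, PySem.Dict.get?, pvLoop_7]
      first
      | (split_ifs <;> omega)
      | omega
    · simp only [pvDelta, PySem.Dict.get?_mk_cons, PySem.Dict.get?, hc]
      norm_num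
      rw [if_neg (fun h => hc h.symm)]
      simp [hc]

theorem pvLoop_5 (l : List Char) :
    pvLoopA 5 l = if l.isPrefixOf (['d', 'u', 'r', 'e'] : List Char) then 5 + (l.length : Int) else -1 := by
  cases l with
  | nil => simp [pvLoopA]
  | cons c r =>
    rw [pvLoopA]
    by_cases hc : c = 'd'
    · subst hc
      simp [pvDelta, PySem.Dict.get?_mk_cons, PySem.Dict.get?, pvLoop_6]
      first
      | (split_ifs <;> omega)
      | omega
    · simp only [pvDelta, PySem.Dict.get?_mk_cons, PySem.Dict.get?, hc]
      norm_num
      rw [if_neg (fun h => hc h.symm)]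
      simp [hc]

theorem pvLoop_4 (l : List Char) :
    pvLoopA 4 l = if l.isPrefixOf (['e', 'd', 'u', 'r', 'e'] : List Char) then 4 + (l.length : Int) else -1 := by
  cases l with
  | nil => simp [pvLoopA]
  | cons c r =>
    rw [pvLoopA]
    by_cases hc : c = 'e'
    · subst hc
      simp [pvDelta, PySem.Dict.get?_mk_cons, PySem.Dict.get?, pvLoop_5]
      first
      | (split_ifs <;> omega)
      | omega
    · simp only [pvDelta, PySem.Dict.get?_mk_cons, PySem.Dict.get?, hc]
      norm_num
      rw [if_neg (fun h => hc h.symm)]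
      simp [hc]

theorem pvLoop_3 (l : List Char) :
    pvLoopA 3 l = if l.isPrefixOf (['c', 'e', 'd', 'u', 'r', 'e'] : List Char) then 3 + (l.length : Int) else -1 := by
  cases l with
  | nil => simp [pvLoopA]
  | cons c r =>
    rw [pvLoopA]
    by_cases hc : c = 'c'
    · subst hc
      simp [pvDelta, PySem.Dict.get?_mk_cons, PySem.Dict.get?, pvLoop_4]
      first
      | (split_ifs <;> omega)
      | omega
    · simp only [pvDelta, PySem.Dict.get?_mk_cons, PySem.Dict.get?, hc]
      norm_num
      rw [if_neg (fun h => hc h.symm)]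
      simp [hc]

theorem pvLoop_2 (l : List Char) :
    pvLoopA 2 l = if l.isPrefixOf (['o', 'c', 'e', 'd', 'u', 'r', 'e'] : List Char) then 2 + (l.length : Int) else -1 := by
  cases l with
  | nil => simp [pvLoopA]
  | cons c r =>
    rw [pvLoopA]
    by_cases hc : c = 'o'
    · subst hc
      simp [pvDelta, PySem.Dict.get?_mk_cons, PySem.Dict.get?, pvLoop_3]
      first
      | (split_ifs <;> omega)
      | omega
    · simp only [pvDelta, PySem.Dict.get?_mk_cons, PySem.Dict.get?, hc]
      norm_num
      rw [if_neg (fun h => hc h.symm)]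
      simp [hc]

theorem pvLoop_1 (l : List Char) :
    pvLoopA 1 l = if l.isPrefixOf (['r', 'o', 'c', 'e', 'd', 'u', 'r', 'e'] : List Char) then 1 + (l.length : Int) else -1 := by
  cases l with
  | nil => simp [pvLoopA]
  | cons c r =>
    rw [pvLoopA]
    by_cases hc : c = 'r'
    · subst hc
      simp [pvDelta, PySem.Dict.get?_mk_cons, PySem.Dict.get?, pvLoop_2]
      first
      | (split_ifs <;> omega)
      | omega
    · simp only [pvDelta, PySem.Dict.get?_mk_cons, PySem.Dict.get?, hc]
      norm_num
      rw [if_neg (fun h => hc h.symm)]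
      simp [hc]

theorem pvLoop_0 (l : List Char) :
    pvLoopA 0 l = if l.isPrefixOf (['p', 'r', 'o', 'c', 'e', 'd', 'u', 'r', 'e'] : List Char) then 0 + (l.length : Int) else -1 := by
  cases l with
  | nil => simp [pvLoopA]
  | cons c r =>
    rw [pvLoopA]
    by_cases hc : c = 'p'
    · subst hc
      simp [pvDelta, PySem.Dict.get?_mk_cons, PySem.Dict.get?, pvLoop_1]
      first
      | (split_ifs <;> omega)
      | omega
    · simp only [pvDelta, PySem.Dict.get?_mk_cons, PySem.Dict.get?, hc]
      norm_num
      rw [if_neg (fun h => hc h.symm)]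
      simp [hc]


-- ===== VERDICT (by name: the statement is the Claim_ definition above) =====
theorem mprocedure_spec : Claim_equal_mprocedure := by
  intro cadena _
  unfold Spec_mprocedure mprocedure mprocedure_alt
  rw [pvLoop_0 cadena.toList]
  by_cases hp : cadena.toList.isPrefixOf ("procedure".toList)
  · have hpre : cadena.toList <+: "procedure".toList := by
      simpa [List.isPrefixOf_iff_prefix] using hp
    have hlen : cadena.toList.length ≤ 9 := by
      simpa using hpre.length_le
    by_cases h9 : cadena.toList.length = 9
    · have hl : cadena.toList = "procedure".toList :=
        List.IsPrefix.eq_of_length hpre (by simpa using h9)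
      have hs : cadena = "procedure" := String.toList_inj.mp hl
      simp [hp, hs, h9]
    · have hs : cadena ≠ "procedure" := by
        intro h; exact h9 (by simp [h])
      have hpre' : cadena.toList <+: ['p','r','o','c','e','d','u','r','e'] := by
        simpa using hpre
      have h9' : cadena.length ≠ 9 := String.length_toList ▸ h9
      have hlen' : ((cadena.length : Int) ≠ 9) := by exact_mod_cast h9'
      simp [hs, PySem.Chars.startswith_iff, hpre', hlen']
  · have hpre : ¬ cadena.toList <+: "procedure".toList := by
      simpa [List.isPrefixOf_iff_prefix] using hp
    have hs : cadena ≠ "procedure" := by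
      intro h; exact hpre (by simp [h])
    have hpre' : ¬ cadena.toList <+: ['p','r','o','c','e','d','u','r','e'] := by
      simpa using hpre
    simp [hs, PySem.Chars.startswith_iff, hpre']
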